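-- pv_equiv track=rewrite | github.com/haesookimDev/Algorithm | 프로그래머스/0/120864. 숨어있는 숫자의 덧셈 （2）/숨어있는 숫자의 덧셈 （2）.py | solution
-- ===== SOURCE A (Python) =====
-- def solution(my_string):
--     answer = 0
--     prefix = ''
--
--     for i in my_string:
--         if i.isdigit():
--             prefix+=i
--         else:
--             if len(prefix)>=1:
--                 answer+=int(prefix)
--                 prefix=''
--     if len(prefix)>=1:
--         answer+=int(prefix)
--         prefix=''
--     return answer
-- ===== SOURCE B (Python) =====
-- def solution(my_string):
--     # run-based scan: peel each maximal digit run with an index pair, convert, skip others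
--     total = 0
--     i = 0
--     n = len(my_string)
--     while i < n:
--         if my_string[i].isdigit():
--             j = i + 1
--             while j < n and my_string[j].isdigit():
--                 j += 1
--             total += int(my_string[i:j])
--             i = j
--         else:
--             i += 1
--     return total
-- ===== Notes on version B (the rewrite author's own statement) =====
-- stated objective: alternative
-- what changed: Replaces A's single char-by-char fold carrying (answer, prefix-buffer) state by a run-based scan that locates each maximal digit run and converts it whole, advancing past each run in one step with no prefix-buffer state.
import Mathlib
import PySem

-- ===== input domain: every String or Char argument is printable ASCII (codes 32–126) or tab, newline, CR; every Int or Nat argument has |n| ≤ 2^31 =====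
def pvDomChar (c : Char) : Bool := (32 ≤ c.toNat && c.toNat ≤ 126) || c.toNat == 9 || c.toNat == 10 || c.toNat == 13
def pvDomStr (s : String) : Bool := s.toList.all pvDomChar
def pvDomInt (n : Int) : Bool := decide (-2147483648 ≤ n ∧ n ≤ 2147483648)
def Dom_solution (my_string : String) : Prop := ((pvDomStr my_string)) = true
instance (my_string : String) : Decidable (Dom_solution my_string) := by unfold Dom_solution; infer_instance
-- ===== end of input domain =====

-- B replaces A's fold with (answer, prefix) state by a run-based scan over maximal digit runs (objective: alternative).
-- int(prefix) on a nonempty all-digit ASCII prefix: PySem.Int.ofStr? is exact there; getD 0 is unreachable.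
def pvIntOf (p : List Char) : Int := (PySem.Int.ofChars? p).getD 0

-- ===== PORT A =====
-- char.isdigit() = Char.isDigit, exact on the ASCII domain
def solution (my_string : String) : Int :=
  let st := my_string.toList.foldl
    (fun (st : Int × List Char) c =>
      if c.isDigit then (st.1, st.2 ++ [c])
      else if st.2.length ≥ 1 then (st.1 + pvIntOf st.2, []) else st)
    (0, [])
  if st.2.length ≥ 1 then st.1 + pvIntOf st.2 else st.1

-- ===== PORT B =====
-- Source B's outer while loop over the remainder becomes recursion on the remaining chars;
-- the inner while loop locating the end of the digit run is takeWhile/dropWhile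
def solutionAltGo : List Char → Int
  | [] => 0
  | c :: rest =>
    if c.isDigit then
      pvIntOf ((c :: rest).takeWhile Char.isDigit)
        + solutionAltGo ((c :: rest).dropWhile Char.isDigit)
    else solutionAltGo rest
termination_by l => l.length
decreasing_by
  · simp only [List.dropWhile, *]
    exact Nat.lt_succ_of_le (List.length_dropWhile_le _ _)
  · simp

def solution_alt (my_string : String) : Int := solutionAltGo my_string.toList

-- ===== PRECONDITION & SPEC =====
def Spec_solution (my_string : String) (out : Int) : Prop := out = solution_alt my_string
instance (my_string : String) (out : Int) : Decidable (Spec_solution my_string out) := by unfold Spec_solution; infer_instance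

-- ===== CLAIM (what is proved, stated in full; the proofs are below) =====
def Claim_equal_solution : Prop := ∀ (my_string : String), Dom_solution my_string → Spec_solution my_string (solution my_string)

-- ===== LEMMAS AND PROOFS =====
def pvStep (st : Int × List Char) (c : Char) : Int × List Char :=
  if c.isDigit then (st.1, st.2 ++ [c])
  else if st.2.length ≥ 1 then (st.1 + pvIntOf st.2, []) else st

def pvFinish (st : Int × List Char) : Int :=
  if st.2.length ≥ 1 then st.1 + pvIntOf st.2 else st.1

theorem solutionAltGo_not_digit (c : Char) (l : List Char) (h : c.isDigit = false) :
    solutionAltGo (c :: l) = solutionAltGo l := by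
  rw [solutionAltGo]; simp [h]

theorem solutionAltGo_digit (c : Char) (l : List Char) (h : c.isDigit = true) :
    solutionAltGo (c :: l) =
      pvIntOf ((c :: l).takeWhile Char.isDigit)
        + solutionAltGo ((c :: l).dropWhile Char.isDigit) := by
  rw [solutionAltGo]; simp [h]

theorem pv_inv (l : List Char) : ∀ (a : Int) (p : List Char),
    p.all Char.isDigit = true →
    pvFinish (l.foldl pvStep (a, p)) = a + solutionAltGo (p ++ l) := by
  induction l with
  | nil =>
    intro a p hp
    cases p with
    | nil => simp [pvFinish, solutionAltGo]
    | cons d ds =>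
      simp only [List.foldl_nil, List.append_nil]
      have hd : d.isDigit = true := by simp [List.all_cons] at hp; exact hp.1
      rw [solutionAltGo_digit d ds hd]
      have htake : (d :: ds).takeWhile Char.isDigit = d :: ds :=
        List.takeWhile_eq_self_iff.mpr (by simpa [List.all_eq] using hp)
      have hdrop : (d :: ds).dropWhile Char.isDigit = [] :=
        List.dropWhile_eq_nil_iff.mpr (by simpa [List.all_eq] using hp)
      rw [htake, hdrop]
      simp [pvFinish, solutionAltGo]
  | cons c l ih =>
    intro a p hp
    by_cases hc : c.isDigit = true
    · have hstep : pvStep (a, p) c = (a, p ++ [c]) := by simp [pvStep, hc]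
      rw [List.foldl_cons, hstep, ih a (p ++ [c]) (by simp_all)]
      simp
    · have hc' : c.isDigit = false := by simpa using hc
      cases p with
      | nil =>
        have hstep : pvStep (a, []) c = (a, []) := by simp [pvStep, hc']
        rw [List.foldl_cons, hstep, ih a [] rfl]
        simp [solutionAltGo_not_digit c l hc']
      | cons d ds =>
        have hstep : pvStep (a, d :: ds) c = (a + pvIntOf (d :: ds), []) := by
          simp [pvStep, hc']
        rw [List.foldl_cons, hstep, ih _ [] rfl]
        have hd : d.isDigit = true := by simp [List.all_cons] at hp; exact hp.1
        rw [List.cons_append, solutionAltGo_digit d (ds ++ c :: l) hd]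
        have htake : (d :: (ds ++ c :: l)).takeWhile Char.isDigit = d :: ds := by
          simp only [List.takeWhile_cons, hd, if_true, List.takeWhile_append]
          simp [List.takeWhile_eq_self_iff.mpr (by simp_all [List.all_eq] : ∀ x ∈ ds, x.isDigit = true), hc']
        have hdrop : (d :: (ds ++ c :: l)).dropWhile Char.isDigit = c :: l := by
          simp only [List.dropWhile_cons, hd, if_true, List.dropWhile_append]
          simp [List.dropWhile_eq_nil_iff.mpr (by simp_all [List.all_eq] : ∀ x ∈ ds, x.isDigit = true), hc']
        rw [htake, hdrop, solutionAltGo_not_digit c l hc']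
        simp only [List.nil_append]
        omega

-- ===== VERDICT (by name: the statement is the Claim_ definition above) =====
theorem solution_spec : Claim_equal_solution := by
  intro s _
  show solution s = solution_alt s
  have h := pv_inv s.toList 0 [] rfl
  simpa [solution, solution_alt, pvStep, pvFinish] using h
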